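-- pv_equiv track=rewrite | github.com/MihasKonopelko/MasterDegreeProject | py/system_data_extractor.py | list_days_system_was_used
-- ===== SOURCE A (Python) =====
-- def list_days_system_was_used(log_content):
--     total_days = 0
--     day_list = []
--     last_day = ""
--
--     for line in log_content:
--         date_str = line[1:11]
--         if is_date(date_str):
--             if date_str != last_day:
--                 total_days += 1
--                 last_day = date_str
--                 day_list+=[last_day+"\n"]
--
--
--     return {"total":str(total_days), "list":''.join(day_list)}
--
-- def is_date(date_str):
--     try:
--         if date_str[4] == "-" and date_str[7] == "-":
--             return True
--     except:
--         return False
-- ===== SOURCE B (Python) =====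
-- def list_days_system_was_used(log_content):
--     dates = [line[1:11] for line in log_content if is_date(line[1:11])]
--     days = dates[:1] + [d for prev, d in zip(dates, dates[1:]) if d != prev]
--     return {"total": str(len(days)), "list": "".join(d + "\n" for d in days)}
--
-- def is_date(date_str):
--     try:
--         if date_str[4] == "-" and date_str[7] == "-":
--             return True
--     except:
--         return False
-- ===== Notes on version B (the rewrite author's own statement) =====
-- stated objective: idiomatic
-- what changed: Replaces the single loop with mutable total/last_day/day_list accumulators by a two-phase pipeline: a comprehension extracting valid date slices, then an adjacent-deduplication over zip(dates, dates[1:]), with count and join derived from that list.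
import Mathlib
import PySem

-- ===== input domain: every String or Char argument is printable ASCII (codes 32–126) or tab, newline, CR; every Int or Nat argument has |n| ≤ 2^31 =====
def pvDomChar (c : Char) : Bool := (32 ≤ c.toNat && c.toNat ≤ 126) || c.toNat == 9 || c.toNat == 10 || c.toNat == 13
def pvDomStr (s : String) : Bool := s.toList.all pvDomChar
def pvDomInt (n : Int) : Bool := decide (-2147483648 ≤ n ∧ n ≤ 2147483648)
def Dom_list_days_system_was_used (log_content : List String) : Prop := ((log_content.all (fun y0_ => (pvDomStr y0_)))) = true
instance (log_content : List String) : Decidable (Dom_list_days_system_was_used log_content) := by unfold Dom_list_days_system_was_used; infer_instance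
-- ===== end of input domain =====

-- B replaces A's single loop with mutable counters by an extract-then-adjacent-dedup pipeline (idiomatic; same cost).

-- ===== PORT A =====
-- helper shared by both sources (Source B keeps A's is_date unchanged)
def is_date (date_str : String) : Bool :=
  -- try: date_str[4] == "-" and date_str[7] == "-"  (IndexError → False; a non-True fall-through returns None, falsy)
  match PySem.Str.pyGet? date_str 4, PySem.Str.pyGet? date_str 7 with
  | some c4, some c7 => c4 == '-' && c7 == '-'
  | _, _ => false

def list_days_system_was_used (log_content : List String) : List (String × String) :=
  let st := log_content.foldl (fun (st : Int × List String × String) line =>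
    let date_str := PySem.Str.slice line (some 1) (some 11)
    if is_date date_str then
      if date_str ≠ st.2.2 then (st.1 + 1, st.2.1 ++ [date_str ++ "\n"], date_str)
      else st
    else st) (0, [], "")
  [("total", PySem.Int.toStr st.1), ("list", PySem.Str.join "" st.2.1)]

-- ===== PORT B =====
def list_days_system_was_used_alt (log_content : List String) : List (String × String) :=
  let dates := log_content.filterMap (fun line =>
    let d := PySem.Str.slice line (some 1) (some 11)
    if is_date d then some d else none)
  let days := PySem.List.slice dates none (some 1) ++
    ((dates.zip (PySem.List.slice dates (some 1) none)).filterMap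
      (fun pd => if pd.2 ≠ pd.1 then some pd.2 else none))
  [("total", PySem.Int.toStr (days.length : Int)),
   ("list", PySem.Str.join "" (days.map (· ++ "\n")))]

-- ===== PRECONDITION & SPEC =====
def Spec_list_days_system_was_used (log_content : List String) (out : List (String × String)) : Prop := out = list_days_system_was_used_alt log_content
instance (log_content : List String) (out : List (String × String)) : Decidable (Spec_list_days_system_was_used log_content out) := by unfold Spec_list_days_system_was_used; infer_instance

-- ===== CLAIM (what is proved, stated in full; the proofs are below) =====
def Claim_equal_list_days_system_was_used : Prop := ∀ (log_content : List String), Dom_list_days_system_was_used log_content → Spec_list_days_system_was_used log_content (list_days_system_was_used log_content)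

-- ===== LEMMAS AND PROOFS =====

-- adjacent dedup of a list relative to a carried previous key s
def rkeys (s : String) : List String → List String
  | [] => []
  | d :: ds => if d ≠ s then d :: rkeys d ds else rkeys s ds

def datesOf (log_content : List String) : List String :=
  log_content.filterMap (fun line =>
    let d := PySem.Str.slice line (some 1) (some 11)
    if is_date d then some d else none)

theorem is_date_ne_empty {d : String} (h : is_date d = true) : d ≠ "" := by
  intro he; rw [he] at h; exact absurd h (by decide)

theorem foldA_eq (L : List String) : ∀ (n : Int) (acc : List String) (s : String),
    L.foldl (fun (st : Int × List String × String) line =>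
      let date_str := PySem.Str.slice line (some 1) (some 11)
      if is_date date_str then
        if date_str ≠ st.2.2 then (st.1 + 1, st.2.1 ++ [date_str ++ "\n"], date_str)
        else st
      else st) (n, acc, s)
    = (n + ((rkeys s (datesOf L)).length : Int),
       acc ++ (rkeys s (datesOf L)).map (· ++ "\n"),
       (rkeys s (datesOf L)).getLastD s) := by
  induction L with
  | nil => intro n acc s; simp [datesOf, rkeys]
  | cons line rest ih =>
    intro n acc s
    rw [List.foldl_cons]
    by_cases hd : is_date (PySem.Str.slice line (some 1) (some 11)) = true
    · by_cases hs : PySem.Str.slice line (some 1) (some 11) = s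
      · simp only [hs, ne_eq, not_true_eq_false, if_false, ite_self]
        rw [ih n acc s,
          show datesOf (line :: rest) = s :: datesOf rest by simp [datesOf, hs, hs ▸ hd]]
        simp [rkeys]
      · simp only [hd, if_true, ne_eq, hs, not_false_eq_true]
        rw [ih,
          show datesOf (line :: rest)
              = PySem.Str.slice line (some 1) (some 11) :: datesOf rest by simp [datesOf, hd]]
        simp only [rkeys, ne_eq, hs, not_false_eq_true, if_true, Prod.mk.injEq]
        refine ⟨by push_cast [List.length_cons]; ring, by simp [List.map_cons, List.append_assoc], by simp [List.getLast?_cons, List.getLastD_eq_getLast?]⟩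
    · simp only [hd, if_false, Bool.false_eq_true]
      rw [ih, show datesOf (line :: rest) = datesOf rest by simp [datesOf, hd]]

theorem zipf_eq (ds : List String) : ∀ (d : String),
    ((d :: ds).zip ds).filterMap (fun pd => if pd.2 ≠ pd.1 then some pd.2 else none)
    = rkeys d ds := by
  induction ds with
  | nil => intro d; simp [rkeys]
  | cons e es ih =>
    intro d
    simp only [List.zip_cons_cons, List.filterMap_cons]
    by_cases he : e = d
    · subst he
      simp only [ne_eq, not_true_eq_false, if_false, rkeys]
      exact ih e
    · simp only [ne_eq, he, not_false_eq_true, if_true, rkeys]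
      rw [ih e]

theorem rkeys_eq_days (D : List String) (hne : ∀ d ∈ D, d ≠ "") :
    PySem.List.slice D none (some 1) ++
      ((D.zip (PySem.List.slice D (some 1) none)).filterMap
        (fun pd => if pd.2 ≠ pd.1 then some pd.2 else none))
    = rkeys "" D := by
  cases D with
  | nil => simp [PySem.List.slice, rkeys]
  | cons d ds =>
    have h1 : PySem.List.slice (d :: ds) none (some 1) = [d] := by
      have := PySem.List.slice_to_natCast (xs := d :: ds) (b := 1)
      simpa using this
    have h2 : PySem.List.slice (d :: ds) (some 1) none = ds := by
      have := PySem.List.slice_from_natCast (xs := d :: ds) (a := 1)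
      simpa using this
    rw [h1, h2, zipf_eq]
    have hd : d ≠ "" := hne d (by simp)
    simp [rkeys, hd]

theorem datesOf_ne_empty (L : List String) : ∀ d ∈ datesOf L, d ≠ "" := by
  intro d hd
  simp only [datesOf, List.mem_filterMap] at hd
  obtain ⟨line, _, h⟩ := hd
  by_cases hv : is_date (PySem.Str.slice line (some 1) (some 11)) = true
  · simp only [hv, if_true, Option.some.injEq] at h
    exact h ▸ is_date_ne_empty hv
  · simp [hv] at h

-- ===== VERDICT (by name: the statement is the Claim_ definition above) =====
theorem list_days_system_was_used_spec : Claim_equal_list_days_system_was_used := by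
  intro L _
  unfold Spec_list_days_system_was_used list_days_system_was_used list_days_system_was_used_alt
  dsimp only
  rw [foldA_eq L 0 [] ""]
  rw [show L.filterMap (fun line =>
        let d := PySem.Str.slice line (some 1) (some 11)
        if is_date d then some d else none) = datesOf L from rfl]
  rw [rkeys_eq_days (datesOf L) (datesOf_ne_empty L)]
  simp
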